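-- pv_equiv track=rewrite | github.com/fal-ai/fal | projects/fal/src/fal/utils.py | _is_fal_requirement
-- ===== SOURCE A (Python) =====
-- def _is_fal_requirement(requirement: str) -> bool:
--     req = requirement.strip()
--     if not req or req.startswith("-"):
--         return False
--
--     package_name = req
--     for separator in ("[", "<", ">", "=", "!", "~", ";", " "):
--         package_name = package_name.split(separator, 1)[0]
--     return package_name.lower() == "fal"
-- ===== SOURCE B (Python) =====
-- _SEPS = frozenset("[<>=!~; ")
--
--
-- def _is_fal_requirement(requirement: str) -> bool:
--     req = requirement.strip()
--     if not req or req.startswith("-"):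
--         return False
--
--     name_chars = []
--     for c in req:
--         if c in _SEPS:
--             break
--         name_chars.append(c)
--     return "".join(name_chars).lower() == "fal"
-- ===== Notes on version B (the rewrite author's own statement) =====
-- stated objective: alternative
-- what changed: Replaces eight sequential split(sep,1) passes over the string with a single left-to-right character scan that collects the prefix before the first separator from a membership set.
import Mathlib
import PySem

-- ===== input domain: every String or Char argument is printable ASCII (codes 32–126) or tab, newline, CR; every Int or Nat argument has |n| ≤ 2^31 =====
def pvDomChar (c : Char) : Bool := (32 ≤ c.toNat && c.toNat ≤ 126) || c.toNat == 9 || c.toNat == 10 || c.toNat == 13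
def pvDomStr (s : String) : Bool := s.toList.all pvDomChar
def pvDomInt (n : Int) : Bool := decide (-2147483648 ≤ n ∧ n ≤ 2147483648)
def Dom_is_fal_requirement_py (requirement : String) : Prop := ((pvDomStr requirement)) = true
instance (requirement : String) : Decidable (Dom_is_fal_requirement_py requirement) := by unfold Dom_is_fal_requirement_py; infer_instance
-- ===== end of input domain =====

-- B replaces A's eight sequential split(sep, 1) passes with one character scan
-- collecting the prefix before the first separator (objective: alternative).

-- ===== PORT A =====
-- package_name.split(separator, 1)[0]: the result list is always nonempty, so headD "" is exact
def pvSplitHead (s sep : String) : String :=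
  ((PySem.Str.splitMax? s sep 1).getD []).headD ""

def is_fal_requirement_py (requirement : String) : Bool :=
  let req := PySem.Str.strip requirement
  if req == "" || PySem.Str.startswith req "-" then false
  else
    let package_name :=
      (["[", "<", ">", "=", "!", "~", ";", " "] : List String).foldl pvSplitHead req
    PySem.Str.lower package_name == "fal"

-- ===== PORT B =====
def pvSeps : List Char := ['[', '<', '>', '=', '!', '~', ';', ' ']

def is_fal_requirement_py_alt (requirement : String) : Bool :=
  let req := PySem.Str.strip requirement
  if req == "" || PySem.Str.startswith req "-" then false
  else
    -- the for-loop with break collecting name_chars is the prefix before the first separator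
    let name := req.toList.takeWhile (fun c => !(pvSeps.contains c))
    PySem.Str.lower (String.ofList name) == "fal"

-- ===== PRECONDITION & SPEC =====
def Spec_is_fal_requirement_py (requirement : String) (out : Bool) : Prop := out = is_fal_requirement_py_alt requirement
instance (requirement : String) (out : Bool) : Decidable (Spec_is_fal_requirement_py requirement out) := by unfold Spec_is_fal_requirement_py; infer_instance

-- ===== CLAIM (what is proved, stated in full; the proofs are below) =====
def Claim_equal_is_fal_requirement_py : Prop := ∀ (requirement : String), Dom_is_fal_requirement_py requirement → Spec_is_fal_requirement_py requirement (is_fal_requirement_py requirement)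

-- ===== LEMMAS AND PROOFS =====

-- with maxsplit exhausted, go flushes the current piece and the remainder
theorem pvGoZero (sep : List Char) (fuel : Nat) (l cur : List Char) (acc : List (List Char)) :
    PySem.Chars.splitOnMax.go sep fuel 0 l cur acc = acc.reverse ++ [cur.reverse ++ l] := by
  cases fuel with
  | zero => simp [PySem.Chars.splitOnMax.go]
  | succ n => cases l <;> simp [PySem.Chars.splitOnMax.go]

-- one split on a single-char separator: first piece is the prefix before the first c
theorem pvGoOne (c : Char) (fuel : Nat) (l cur : List Char) (acc : List (List Char))
    (h : l.length < fuel) :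
    PySem.Chars.splitOnMax.go [c] fuel 1 l cur acc =
      acc.reverse ++ (cur.reverse ++ l.takeWhile (· ≠ c)) ::
        (if l.dropWhile (· ≠ c) = [] then [] else [(l.dropWhile (· ≠ c)).drop 1]) := by
  induction fuel generalizing l cur acc with
  | zero => omega
  | succ n ih =>
    cases l with
    | nil => simp [PySem.Chars.splitOnMax.go]
    | cons c' rest =>
      by_cases hc : c' = c
      · subst hc
        simp [PySem.Chars.splitOnMax.go, List.isPrefixOf, pvGoZero]
      · have : rest.length < n := by simpa using h
        simp [PySem.Chars.splitOnMax.go, List.isPrefixOf, hc, ih rest (c' :: cur) acc this,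
              Ne.symm hc]

theorem pvSplitHead_single (s sep : String) (c : Char) (h : sep.toList = [c]) :
    (pvSplitHead s sep).toList = s.toList.takeWhile (· ≠ c) := by
  simp only [pvSplitHead, PySem.Str.splitMax?, h]
  simp only [PySem.Chars.splitMax?, List.isEmpty_cons, Bool.false_eq_true, if_false,
    Option.map_some, Option.getD_some]
  rw [PySem.Chars.splitOnMax]
  simp only [show ¬ ((1:Int) < 0) by decide, if_false, Int.toNat_one]
  rw [pvGoOne c (s.toList.length + 1) s.toList [] [] (by omega)]
  split <;> simp

theorem is_fal_requirement_py_eq (requirement : String) :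
    is_fal_requirement_py requirement = is_fal_requirement_py_alt requirement := by
  unfold is_fal_requirement_py is_fal_requirement_py_alt
  simp only []
  set req := PySem.Str.strip requirement with hreq
  by_cases hguard : (req == "" || PySem.Str.startswith req "-") = true
  · rw [if_pos hguard, if_pos hguard]
  · rw [if_neg hguard, if_neg hguard]
    have hpkg : (["[", "<", ">", "=", "!", "~", ";", " "] : List String).foldl pvSplitHead req
        = String.ofList (req.toList.takeWhile (fun c => !(pvSeps.contains c))) := by
      apply String.toList_injective
      rw [String.toList_ofList]
      simp only [List.foldl_cons, List.foldl_nil]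
      rw [pvSplitHead_single _ " " ' ' rfl,
          pvSplitHead_single _ ";" ';' rfl,
          pvSplitHead_single _ "~" '~' rfl,
          pvSplitHead_single _ "!" '!' rfl,
          pvSplitHead_single _ "=" '=' rfl,
          pvSplitHead_single _ ">" '>' rfl,
          pvSplitHead_single _ "<" '<' rfl,
          pvSplitHead_single _ "[" '[' rfl]
      simp only [List.takeWhile_takeWhile]
      congr 1
      funext c
      simp only [pvSeps, List.contains_eq_mem, List.mem_cons, List.not_mem_nil, or_false,
        decide_eq_true_eq]
      by_cases h1 : c = '[' <;> by_cases h2 : c = '<' <;> by_cases h3 : c = '>' <;>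
        by_cases h4 : c = '=' <;> by_cases h5 : c = '!' <;> by_cases h6 : c = '~' <;>
        by_cases h7 : c = ';' <;> by_cases h8 : c = ' ' <;>
        simp [h1, h2, h3, h4, h5, h6, h7, h8]
    rw [hpkg]

-- ===== VERDICT (by name: the statement is the Claim_ definition above) =====
theorem is_fal_requirement_py_spec : Claim_equal_is_fal_requirement_py := by
  intro requirement _
  unfold Spec_is_fal_requirement_py
  exact is_fal_requirement_py_eq requirement
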